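-- pv_equiv track=rewrite | github.com/Aurora-TF/Algorithm | week1 - array/koo/5_pro_49994.py | solution
-- ===== SOURCE A (Python) =====
-- def solution(dirs):
--     answer = 0
--
--     UP = [[0] * 11 for _ in range(11)]
--     DOWN = [[0] * 11 for _ in range(11)]
--     LEFT = [[0] * 11 for _ in range(11)]
--     RIGHT = [[0] * 11 for _ in range(11)]
--
--     pos_x = 5
--     pos_y = 5
--
--     for dir in dirs:
--         if dir == "U":
--             if pos_y == 0:
--                 continue
--             if UP[pos_y][pos_x] == 0 and DOWN[pos_y - 1][pos_x] == 0:
--                 answer += 1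
--
--             UP[pos_y][pos_x] = 1
--             pos_y -= 1
--         elif dir == "D":
--             if pos_y == 10:
--                 continue
--             if DOWN[pos_y][pos_x] == 0 and UP[pos_y + 1][pos_x] == 0:
--                 answer += 1
--
--             DOWN[pos_y][pos_x] = 1
--             pos_y += 1
--         elif dir == "L":
--             if pos_x == 0:
--                 continue
--             if LEFT[pos_y][pos_x] == 0 and RIGHT[pos_y][pos_x - 1] == 0:
--                 answer += 1
--
--             LEFT[pos_y][pos_x] = 1
--             pos_x -= 1
--         elif dir == "R":
--             if pos_x == 10:
--                 continue
--             if RIGHT[pos_y][pos_x] == 0 and LEFT[pos_y][pos_x + 1] == 0: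
--                 answer += 1
--
--             RIGHT[pos_y][pos_x] = 1
--             pos_x += 1
--
--     return answer
-- ===== SOURCE B (Python) =====
-- def solution(dirs):
--     moves = {'U': (0, -1), 'D': (0, 1), 'L': (-1, 0), 'R': (1, 0)}
--     x, y = 5, 5
--     path = [(x, y)]
--     for ch in dirs:
--         if ch in moves:
--             dx, dy = moves[ch]
--             nx, ny = x + dx, y + dy
--             if 0 <= nx <= 10 and 0 <= ny <= 10:
--                 path.append((nx, ny))
--                 x, y = nx, ny
--     return len({(min(p, q), max(p, q)) for p, q in zip(path, path[1:])})
-- ===== Notes on version B (the rewrite author's own statement) =====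
-- stated objective: alternative
-- what changed: B is a staged pipeline: pass 1 builds the list of positions actually visited (a dict move-table, one uniform bounds check), pass 2 forms the canonical edge of each consecutive position pair and returns the size of their set - no per-move counting and no four 11x11 direction-marker matrices.
import Mathlib
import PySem

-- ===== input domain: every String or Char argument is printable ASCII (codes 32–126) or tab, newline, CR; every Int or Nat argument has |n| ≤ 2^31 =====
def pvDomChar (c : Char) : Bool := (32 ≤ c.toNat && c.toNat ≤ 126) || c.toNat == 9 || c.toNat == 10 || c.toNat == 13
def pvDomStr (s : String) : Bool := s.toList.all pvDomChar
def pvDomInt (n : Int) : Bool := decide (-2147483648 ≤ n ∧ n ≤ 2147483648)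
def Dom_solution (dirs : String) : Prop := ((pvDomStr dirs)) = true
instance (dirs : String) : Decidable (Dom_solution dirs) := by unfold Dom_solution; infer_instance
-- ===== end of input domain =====

-- B replaces A's per-move counting with four 11x11 direction-marker matrices by a staged
-- pipeline: build the visited-position path, then count the set of canonical consecutive
-- edges; objective: alternative.

-- ===== PORT A =====
-- A's four 11x11 integer matrices are rendered as total functions Int → Int → Int
-- (row y, column x); every Python access stays inside 0..10, so this is exact.
structure StA where
  ans : Int
  up : Int → Int → Int
  dn : Int → Int → Int
  lf : Int → Int → Int
  rt : Int → Int → Int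
  x : Int
  y : Int

def upd (g : Int → Int → Int) (y x v : Int) : Int → Int → Int :=
  fun y' x' => if y' = y ∧ x' = x then v else g y' x'

def stepA (s : StA) (c : Char) : StA :=
  if c = 'U' then
    if s.y = 0 then s
    else
      let s1 := if s.up s.y s.x = 0 ∧ s.dn (s.y - 1) s.x = 0 then { s with ans := s.ans + 1 } else s
      { s1 with up := upd s1.up s.y s.x 1, y := s.y - 1 }
  else if c = 'D' then
    if s.y = 10 then s
    else
      let s1 := if s.dn s.y s.x = 0 ∧ s.up (s.y + 1) s.x = 0 then { s with ans := s.ans + 1 } else s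
      { s1 with dn := upd s1.dn s.y s.x 1, y := s.y + 1 }
  else if c = 'L' then
    if s.x = 0 then s
    else
      let s1 := if s.lf s.y s.x = 0 ∧ s.rt s.y (s.x - 1) = 0 then { s with ans := s.ans + 1 } else s
      { s1 with lf := upd s1.lf s.y s.x 1, x := s.x - 1 }
  else if c = 'R' then
    if s.x = 10 then s
    else
      let s1 := if s.rt s.y s.x = 0 ∧ s.lf s.y (s.x + 1) = 0 then { s with ans := s.ans + 1 } else s
      { s1 with rt := upd s1.rt s.y s.x 1, x := s.x + 1 }
  else s

def initA : StA := ⟨0, fun _ _ => 0, fun _ _ => 0, fun _ _ => 0, fun _ _ => 0, 5, 5⟩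

def solution (dirs : String) : Int := (dirs.toList.foldl stepA initA).ans

-- ===== PORT B =====
-- Python's min/max on two (int, int) tuples (lexicographic, first argument on ties)
def pymin (p q : Int × Int) : Int × Int :=
  if p.1 < q.1 ∨ (p.1 = q.1 ∧ p.2 ≤ q.2) then p else q

def pymax (p q : Int × Int) : Int × Int :=
  if p.1 < q.1 ∨ (p.1 = q.1 ∧ p.2 ≤ q.2) then q else p

def moveTable : PySem.Dict Char (Int × Int) :=
  PySem.Dict.ofList [('U', (0, -1)), ('D', (0, 1)), ('L', (-1, 0)), ('R', (1, 0))]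

-- one loop iteration of B's pass 1 (state: current position, path so far;
-- 'ch in moves' + 'moves[ch]' is the single Dict lookup)
def stepP (s : (Int × Int) × List (Int × Int)) (c : Char) : (Int × Int) × List (Int × Int) :=
  match moveTable.get? c with
  | none => s
  | some d =>
    let nx := s.1.1 + d.1
    let ny := s.1.2 + d.2
    if 0 ≤ nx ∧ nx ≤ 10 ∧ 0 ≤ ny ∧ ny ≤ 10 then ((nx, ny), s.2 ++ [(nx, ny)]) else s

-- pass 2: the canonical edge of each consecutive pair of path positions
def edgesOf (path : List (Int × Int)) : List ((Int × Int) × (Int × Int)) :=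
  (path.zip path.tail).map (fun pq => (pymin pq.1 pq.2, pymax pq.1 pq.2))

def solution_alt (dirs : String) : Int :=
  let st := dirs.toList.foldl stepP ((5, 5), [(5, 5)])
  ((PySem.Set.ofList (edgesOf st.2)).length : Int)

-- ===== PRECONDITION & SPEC =====
def Spec_solution (dirs : String) (out : Int) : Prop := out = solution_alt dirs
instance (dirs : String) (out : Int) : Decidable (Spec_solution dirs out) := by unfold Spec_solution; infer_instance

-- ===== CLAIM (what is proved, stated in full; the proofs are below) =====
def Claim_equal_solution : Prop := ∀ (dirs : String), Dom_solution dirs → Spec_solution dirs (solution dirs)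

-- ===== LEMMAS AND PROOFS =====

-- Proof-only intermediate machine: a one-pass counter over a set of canonical edges.
-- A is related to it by CoupleInv; it is related to B's staged pipeline by Inv2.
def delta (c : Char) : Option (Int × Int) :=
  if c = 'U' then some (0, -1)
  else if c = 'D' then some (0, 1)
  else if c = 'L' then some (-1, 0)
  else if c = 'R' then some (1, 0)
  else none

lemma get?_moveTable (c : Char) : moveTable.get? c = delta c := by
  by_cases hU : c = 'U'
  · subst hU; decide
  by_cases hD : c = 'D'
  · subst hD; decide
  by_cases hL : c = 'L'
  · subst hL; decide
  by_cases hR : c = 'R'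
  · subst hR; decide
  have hmt : moveTable =
      PySem.Dict.mk [('U', (0, -1)), ('D', (0, 1)), ('L', (-1, 0)), ('R', (1, 0))] := by decide
  simp only [delta, if_neg hU, if_neg hD, if_neg hL, if_neg hR, hmt,
    PySem.Dict.get?_mk_cons, beq_iff_eq]
  rw [if_neg (fun h => hU h.symm), if_neg (fun h => hD h.symm),
      if_neg (fun h => hL h.symm), if_neg (fun h => hR h.symm)]
  rfl

structure StB where
  ans : Int
  x : Int
  y : Int
  vis : PySem.Set ((Int × Int) × (Int × Int))

def stepB (s : StB) (c : Char) : StB :=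
  match delta c with
  | none => s
  | some d =>
    let nx := s.x + d.1
    let ny := s.y + d.2
    if 0 ≤ nx ∧ nx ≤ 10 ∧ 0 ≤ ny ∧ ny ≤ 10 then
      let e := (pymin (s.x, s.y) (nx, ny), pymax (s.x, s.y) (nx, ny))
      if e ∈ s.vis then { s with x := nx, y := ny }
      else { s with ans := s.ans + 1, vis := PySem.Set.add s.vis e, x := nx, y := ny }
    else s

def initB : StB := ⟨0, 5, 5, PySem.Set.empty⟩

-- The coupling invariant: answers and positions agree, the position is on the 0..10
-- grid, and a vertical edge {(x,y-1),(x,y)} (resp. horizontal {(x-1,y),(x,y)}) is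
-- marked in A's matrices iff its canonical key is in B's visited set.
def CoupleInv (a : StA) (b : StB) : Prop :=
  a.ans = b.ans ∧ a.x = b.x ∧ a.y = b.y ∧
  0 ≤ b.x ∧ b.x ≤ 10 ∧ 0 ≤ b.y ∧ b.y ≤ 10 ∧
  (∀ x y : Int, (a.up y x ≠ 0 ∨ a.dn (y - 1) x ≠ 0) ↔ ((x, y - 1), (x, y)) ∈ b.vis) ∧
  (∀ x y : Int, (a.lf y x ≠ 0 ∨ a.rt y (x - 1) ≠ 0) ↔ ((x - 1, y), (x, y)) ∈ b.vis)

lemma step_inv (c : Char) (a : StA) (b : StB) (h : CoupleInv a b) :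
    CoupleInv (stepA a c) (stepB b c) := by
  obtain ⟨aans, aup, adn, alf, art, ax, ay⟩ := a
  obtain ⟨bans, bx, yb, bvis⟩ := b
  obtain ⟨hans, hx, hy, hx0, hx1, hy0, hy1, hV, hH⟩ := h
  simp only at hans hx hy hV hH hx0 hx1 hy0 hy1
  subst hans; subst hx; subst hy
  by_cases hcU : c = 'U'
  · subst hcU
    simp only [stepA, stepB, delta, reduceIte]
    by_cases h0 : ay = 0
    · rw [if_pos h0, if_neg (show ¬(0 ≤ ax + 0 ∧ ax + 0 ≤ 10 ∧ 0 ≤ ay + -1 ∧ ay + -1 ≤ 10) from by omega)]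
      exact ⟨rfl, rfl, rfl, hx0, hx1, hy0, hy1, hV, hH⟩
    · rw [if_neg h0, if_pos (show 0 ≤ ax + 0 ∧ ax + 0 ≤ 10 ∧ 0 ≤ ay + -1 ∧ ay + -1 ≤ 10 from by omega)]
      have hmin : pymin (ax, ay) (ax + 0, ay + -1) = (ax, ay - 1) := by
        simp only [pymin]; rw [if_neg (by omega)]
        simp only [Prod.mk.injEq]; omega
      have hmax : pymax (ax, ay) (ax + 0, ay + -1) = (ax, ay) := by
        simp only [pymax]; rw [if_neg (by omega)]
      rw [hmin, hmax]
      by_cases hm : ((ax, ay - 1), (ax, ay)) ∈ bvis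
      · rw [if_pos hm]
        have hcond : ¬(aup ay ax = 0 ∧ adn (ay - 1) ax = 0) := by
          have := (hV ax ay).mpr hm; tauto
        rw [if_neg hcond]
        dsimp only [CoupleInv]
        refine ⟨rfl, by omega, by omega, by omega, by omega, by omega, by omega, ?_, ?_⟩
        · intro x' y'
          simp only [upd]
          split_ifs with hsp
          · constructor
            · intro _
              obtain ⟨h1, h2⟩ := hsp; subst h1; subst h2; exact hm
            · intro _; exact Or.inl (by norm_num)
          · exact hV x' y'
        · exact hH
      · rw [if_neg hm]
        have hcond : aup ay ax = 0 ∧ adn (ay - 1) ax = 0 := by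
          constructor
          · by_contra hne; exact hm ((hV ax ay).mp (Or.inl hne))
          · by_contra hne; exact hm ((hV ax ay).mp (Or.inr hne))
        rw [if_pos hcond]
        dsimp only [CoupleInv]
        refine ⟨rfl, by omega, by omega, by omega, by omega, by omega, by omega, ?_, ?_⟩
        · intro x' y'
          simp only [upd, PySem.Set.mem_add]
          split_ifs with hsp
          · constructor
            · intro _; exact Or.inr (by simp only [Prod.mk.injEq]; omega)
            · intro _; exact Or.inl (by norm_num)
          · constructor
            · intro hl; exact Or.inl ((hV x' y').mp hl)
            · rintro (hmem | hkey)
              · exact (hV x' y').mpr hmem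
              · exfalso; simp only [Prod.mk.injEq] at hkey
                exact hsp ⟨by omega, by omega⟩
        · intro x' y'
          simp only [PySem.Set.mem_add]
          constructor
          · intro hl; exact Or.inl ((hH x' y').mp hl)
          · rintro (hmem | hkey)
            · exact (hH x' y').mpr hmem
            · exfalso; simp only [Prod.mk.injEq] at hkey; omega
  · by_cases hcD : c = 'D'
    · subst hcD
      simp only [stepA, stepB, delta, if_neg (show ¬('D' : Char) = 'U' from by decide), reduceIte]
      by_cases h0 : ay = 10
      · rw [if_pos h0, if_neg (show ¬(0 ≤ ax + 0 ∧ ax + 0 ≤ 10 ∧ 0 ≤ ay + 1 ∧ ay + 1 ≤ 10) from by omega)]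
        exact ⟨rfl, rfl, rfl, hx0, hx1, hy0, hy1, hV, hH⟩
      · rw [if_neg h0, if_pos (show 0 ≤ ax + 0 ∧ ax + 0 ≤ 10 ∧ 0 ≤ ay + 1 ∧ ay + 1 ≤ 10 from by omega)]
        have hmin : pymin (ax, ay) (ax + 0, ay + 1) = (ax, ay) := by
          simp only [pymin]; rw [if_pos (by omega)]
        have hmax : pymax (ax, ay) (ax + 0, ay + 1) = (ax, ay + 1) := by
          simp only [pymax]; rw [if_pos (by omega)]
          simp only [Prod.mk.injEq, and_true]; omega
        rw [hmin, hmax]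
        have hDV : (aup (ay + 1) ax ≠ 0 ∨ adn ay ax ≠ 0) ↔ ((ax, ay), (ax, ay + 1)) ∈ bvis := by
          have := hV ax (ay + 1)
          rw [show ay + 1 - 1 = ay from by omega] at this
          exact this
        by_cases hm : ((ax, ay), (ax, ay + 1)) ∈ bvis
        · rw [if_pos hm]
          have hcond : ¬(adn ay ax = 0 ∧ aup (ay + 1) ax = 0) := by
            have := hDV.mpr hm; tauto
          rw [if_neg hcond]
          dsimp only [CoupleInv]
          refine ⟨rfl, by omega, by omega, by omega, by omega, by omega, by omega, ?_, ?_⟩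
          · intro x' y'
            simp only [upd]
            split_ifs with hsp
            · constructor
              · intro _
                have hkey : ((x', y' - 1), (x', y')) = ((ax, ay), (ax, ay + 1)) := by
                  simp only [Prod.mk.injEq]; omega
                rw [hkey]; exact hm
              · intro _; exact Or.inr (by norm_num)
            · exact hV x' y'
          · exact hH
        · rw [if_neg hm]
          have hcond : adn ay ax = 0 ∧ aup (ay + 1) ax = 0 := by
            constructor
            · by_contra hne; exact hm (hDV.mp (Or.inr hne))
            · by_contra hne; exact hm (hDV.mp (Or.inl hne))
          rw [if_pos hcond]
          dsimp only [CoupleInv]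
          refine ⟨rfl, by omega, by omega, by omega, by omega, by omega, by omega, ?_, ?_⟩
          · intro x' y'
            simp only [upd, PySem.Set.mem_add]
            split_ifs with hsp
            · constructor
              · intro _; exact Or.inr (by simp only [Prod.mk.injEq]; omega)
              · intro _; exact Or.inr (by norm_num)
            · constructor
              · intro hl; exact Or.inl ((hV x' y').mp hl)
              · rintro (hmem | hkey)
                · exact (hV x' y').mpr hmem
                · exfalso; simp only [Prod.mk.injEq] at hkey
                  exact hsp ⟨by omega, by omega⟩
          · intro x' y'
            simp only [PySem.Set.mem_add]
            constructor
            · intro hl; exact Or.inl ((hH x' y').mp hl)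
            · rintro (hmem | hkey)
              · exact (hH x' y').mpr hmem
              · exfalso; simp only [Prod.mk.injEq] at hkey; omega
    · by_cases hcL : c = 'L'
      · subst hcL
        simp only [stepA, stepB, delta, if_neg (show ¬('L' : Char) = 'U' from by decide),
          if_neg (show ¬('L' : Char) = 'D' from by decide), reduceIte]
        by_cases h0 : ax = 0
        · rw [if_pos h0, if_neg (show ¬(0 ≤ ax + -1 ∧ ax + -1 ≤ 10 ∧ 0 ≤ ay + 0 ∧ ay + 0 ≤ 10) from by omega)]
          exact ⟨rfl, rfl, rfl, hx0, hx1, hy0, hy1, hV, hH⟩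
        · rw [if_neg h0, if_pos (show 0 ≤ ax + -1 ∧ ax + -1 ≤ 10 ∧ 0 ≤ ay + 0 ∧ ay + 0 ≤ 10 from by omega)]
          have hmin : pymin (ax, ay) (ax + -1, ay + 0) = (ax - 1, ay) := by
            simp only [pymin]; rw [if_neg (by omega)]
            simp only [Prod.mk.injEq]; omega
          have hmax : pymax (ax, ay) (ax + -1, ay + 0) = (ax, ay) := by
            simp only [pymax]; rw [if_neg (by omega)]
          rw [hmin, hmax]
          by_cases hm : ((ax - 1, ay), (ax, ay)) ∈ bvis
          · rw [if_pos hm]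
            have hcond : ¬(alf ay ax = 0 ∧ art ay (ax - 1) = 0) := by
              have := (hH ax ay).mpr hm; tauto
            rw [if_neg hcond]
            dsimp only [CoupleInv]
            refine ⟨rfl, by omega, by omega, by omega, by omega, by omega, by omega, ?_, ?_⟩
            · exact hV
            · intro x' y'
              simp only [upd]
              split_ifs with hsp
              · constructor
                · intro _
                  obtain ⟨h1, h2⟩ := hsp; subst h1; subst h2; exact hm
                · intro _; exact Or.inl (by norm_num)
              · exact hH x' y'
          · rw [if_neg hm]
            have hcond : alf ay ax = 0 ∧ art ay (ax - 1) = 0 := by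
              constructor
              · by_contra hne; exact hm ((hH ax ay).mp (Or.inl hne))
              · by_contra hne; exact hm ((hH ax ay).mp (Or.inr hne))
            rw [if_pos hcond]
            dsimp only [CoupleInv]
            refine ⟨rfl, by omega, by omega, by omega, by omega, by omega, by omega, ?_, ?_⟩
            · intro x' y'
              simp only [PySem.Set.mem_add]
              constructor
              · intro hl; exact Or.inl ((hV x' y').mp hl)
              · rintro (hmem | hkey)
                · exact (hV x' y').mpr hmem
                · exfalso; simp only [Prod.mk.injEq] at hkey; omega
            · intro x' y'
              simp only [upd, PySem.Set.mem_add]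
              split_ifs with hsp
              · constructor
                · intro _; exact Or.inr (by simp only [Prod.mk.injEq]; omega)
                · intro _; exact Or.inl (by norm_num)
              · constructor
                · intro hl; exact Or.inl ((hH x' y').mp hl)
                · rintro (hmem | hkey)
                  · exact (hH x' y').mpr hmem
                  · exfalso; simp only [Prod.mk.injEq] at hkey
                    exact hsp ⟨by omega, by omega⟩
      · by_cases hcR : c = 'R'
        · subst hcR
          simp only [stepA, stepB, delta, if_neg (show ¬('R' : Char) = 'U' from by decide),
            if_neg (show ¬('R' : Char) = 'D' from by decide),
            if_neg (show ¬('R' : Char) = 'L' from by decide), reduceIte]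
          by_cases h0 : ax = 10
          · rw [if_pos h0, if_neg (show ¬(0 ≤ ax + 1 ∧ ax + 1 ≤ 10 ∧ 0 ≤ ay + 0 ∧ ay + 0 ≤ 10) from by omega)]
            exact ⟨rfl, rfl, rfl, hx0, hx1, hy0, hy1, hV, hH⟩
          · rw [if_neg h0, if_pos (show 0 ≤ ax + 1 ∧ ax + 1 ≤ 10 ∧ 0 ≤ ay + 0 ∧ ay + 0 ≤ 10 from by omega)]
            have hmin : pymin (ax, ay) (ax + 1, ay + 0) = (ax, ay) := by
              simp only [pymin]; rw [if_pos (by omega)]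
            have hmax : pymax (ax, ay) (ax + 1, ay + 0) = (ax + 1, ay) := by
              simp only [pymax]; rw [if_pos (by omega)]
              simp only [Prod.mk.injEq, true_and]; omega
            rw [hmin, hmax]
            have hRH : (alf ay (ax + 1) ≠ 0 ∨ art ay ax ≠ 0) ↔ ((ax, ay), (ax + 1, ay)) ∈ bvis := by
              have := hH (ax + 1) ay
              rw [show ax + 1 - 1 = ax from by omega] at this
              exact this
            by_cases hm : ((ax, ay), (ax + 1, ay)) ∈ bvis
            · rw [if_pos hm]
              have hcond : ¬(art ay ax = 0 ∧ alf ay (ax + 1) = 0) := by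
                have := hRH.mpr hm; tauto
              rw [if_neg hcond]
              dsimp only [CoupleInv]
              refine ⟨rfl, by omega, by omega, by omega, by omega, by omega, by omega, ?_, ?_⟩
              · exact hV
              · intro x' y'
                simp only [upd]
                split_ifs with hsp
                · constructor
                  · intro _
                    have hkey : ((x' - 1, y'), (x', y')) = ((ax, ay), (ax + 1, ay)) := by
                      simp only [Prod.mk.injEq]; omega
                    rw [hkey]; exact hm
                  · intro _; exact Or.inr (by norm_num)
                · exact hH x' y'
            · rw [if_neg hm]
              have hcond : art ay ax = 0 ∧ alf ay (ax + 1) = 0 := by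
                constructor
                · by_contra hne; exact hm (hRH.mp (Or.inr hne))
                · by_contra hne; exact hm (hRH.mp (Or.inl hne))
              rw [if_pos hcond]
              dsimp only [CoupleInv]
              refine ⟨rfl, by omega, by omega, by omega, by omega, by omega, by omega, ?_, ?_⟩
              · intro x' y'
                simp only [PySem.Set.mem_add]
                constructor
                · intro hl; exact Or.inl ((hV x' y').mp hl)
                · rintro (hmem | hkey)
                  · exact (hV x' y').mpr hmem
                  · exfalso; simp only [Prod.mk.injEq] at hkey; omega
              · intro x' y'
                simp only [upd, PySem.Set.mem_add]
                split_ifs with hsp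
                · constructor
                  · intro _; exact Or.inr (by simp only [Prod.mk.injEq]; omega)
                  · intro _; exact Or.inr (by norm_num)
                · constructor
                  · intro hl; exact Or.inl ((hH x' y').mp hl)
                  · rintro (hmem | hkey)
                    · exact (hH x' y').mpr hmem
                    · exfalso; simp only [Prod.mk.injEq] at hkey
                      exact hsp ⟨by omega, by omega⟩
        · simp only [stepA, stepB, delta, if_neg hcU, if_neg hcD, if_neg hcL, if_neg hcR]
          exact ⟨rfl, rfl, rfl, hx0, hx1, hy0, hy1, hV, hH⟩

lemma fold_inv (l : List Char) (a : StA) (b : StB) (h : CoupleInv a b) :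
    CoupleInv (l.foldl stepA a) (l.foldl stepB b) := by
  induction l generalizing a b with
  | nil => exact h
  | cons c l ih => exact ih _ _ (step_inv c a b h)

lemma init_inv : CoupleInv initA initB := by
  refine ⟨rfl, rfl, rfl, by simp [initB], by simp [initB], by simp [initB], by simp [initB], ?_, ?_⟩ <;>
    intro x y <;> simp [initA, initB, PySem.Set.empty]

-- ---- link between the one-pass counter and B's staged pipeline ----

lemma edgesOf_concat (path : List (Int × Int)) (p q : Int × Int)
    (h : path.getLast? = some p) :
    edgesOf (path ++ [q]) = edgesOf path ++ [(pymin p q, pymax p q)] := by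
  induction path generalizing p with
  | nil => simp at h
  | cons a t ih =>
    cases t with
    | nil =>
      simp only [List.getLast?_singleton, Option.some.injEq] at h
      subst h
      rfl
    | cons b t' =>
      have h' : (b :: t').getLast? = some p := by
        rw [List.getLast?_cons_cons] at h; exact h
      have := ih p h'
      simp only [List.cons_append]
      show (pymin a b, pymax a b) :: edgesOf ((b :: t') ++ [q]) =
        ((pymin a b, pymax a b) :: edgesOf (b :: t')) ++ [(pymin p q, pymax p q)]
      rw [this]; rfl

lemma ofList_concat_length {α : Type} [BEq α] [LawfulBEq α] [DecidableEq α] (l : List α) (e : α) :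
    (PySem.Set.ofList (l ++ [e])).length =
      (PySem.Set.ofList l).length + (if e ∈ l then 0 else 1) := by
  have hof : PySem.Set.ofList (l ++ [e]) = PySem.Set.add (PySem.Set.ofList l) e := by
    simp [PySem.Set.ofList_eq_foldl, List.foldl_append]
  rw [hof]
  by_cases hm : e ∈ l
  · have : PySem.Set.contains (PySem.Set.ofList l) e = true := by
      rw [PySem.Set.contains_iff, PySem.Set.mem_ofList]; exact hm
    simp [PySem.Set.add, hm]
  · have : PySem.Set.contains (PySem.Set.ofList l) e = false := by
      rw [Bool.eq_false_iff]
      intro hc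
      exact hm ((PySem.Set.mem_ofList _ _).mp ((PySem.Set.contains_iff _ _).mp hc))
    simp [PySem.Set.add, hm]

-- invariant between the one-pass machine and the (position, path) state of B's pass 1
def Inv2 (b : StB) (s : (Int × Int) × List (Int × Int)) : Prop :=
  b.x = s.1.1 ∧ b.y = s.1.2 ∧ s.2.getLast? = some s.1 ∧
  b.ans = ((PySem.Set.ofList (edgesOf s.2)).length : Int) ∧
  (∀ e, e ∈ b.vis ↔ e ∈ edgesOf s.2)

lemma step2_inv (c : Char) (b : StB) (s : (Int × Int) × List (Int × Int))
    (h : Inv2 b s) : Inv2 (stepB b c) (stepP s c) := by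
  obtain ⟨hx, hy, hlast, hans, hvis⟩ := h
  unfold stepB stepP
  rw [get?_moveTable]
  cases hd : delta c with
  | none => exact ⟨hx, hy, hlast, hans, hvis⟩
  | some d =>
    simp only
    rw [hx, hy]
    by_cases hr : 0 ≤ s.1.1 + d.1 ∧ s.1.1 + d.1 ≤ 10 ∧ 0 ≤ s.1.2 + d.2 ∧ s.1.2 + d.2 ≤ 10
    · rw [if_pos hr, if_pos hr]
      have hpos : ((b.x, b.y) : Int × Int) = s.1 := by rw [hx, hy]
      have hedges : edgesOf (s.2 ++ [(s.1.1 + d.1, s.1.2 + d.2)]) =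
          edgesOf s.2 ++ [(pymin s.1 (s.1.1 + d.1, s.1.2 + d.2),
                           pymax s.1 (s.1.1 + d.1, s.1.2 + d.2))] :=
        edgesOf_concat s.2 s.1 _ hlast
      set e := (pymin (s.1.1, s.1.2) (s.1.1 + d.1, s.1.2 + d.2),
                pymax (s.1.1, s.1.2) (s.1.1 + d.1, s.1.2 + d.2)) with he
      by_cases hm : e ∈ b.vis
      · rw [if_pos hm]
        refine ⟨rfl, rfl, by simp, ?_, ?_⟩
        · show b.ans = _
          rw [hedges, ofList_concat_length]
          rw [if_pos ((hvis e).mp hm)]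
          simpa using hans
        · intro e'
          rw [hedges, List.mem_append, List.mem_singleton]
          constructor
          · intro h'; exact Or.inl ((hvis e').mp h')
          · rintro (h' | h')
            · exact (hvis e').mpr h'
            · subst h'; exact hm
      · rw [if_neg hm]
        refine ⟨rfl, rfl, by simp, ?_, ?_⟩
        · show b.ans + 1 = _
          rw [hedges, ofList_concat_length]
          rw [if_neg (fun h' => hm ((hvis e).mpr h'))]
          rw [hans]; push_cast; ring
        · intro e'
          rw [hedges, List.mem_append, List.mem_singleton, PySem.Set.mem_add]
          exact or_congr (hvis e') Iff.rfl
    · rw [if_neg hr, if_neg hr]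
      exact ⟨hx, hy, hlast, hans, hvis⟩

lemma fold2_inv (l : List Char) (b : StB) (s : (Int × Int) × List (Int × Int))
    (h : Inv2 b s) : Inv2 (l.foldl stepB b) (l.foldl stepP s) := by
  induction l generalizing b s with
  | nil => exact h
  | cons c l ih => exact ih _ _ (step2_inv c b s h)

lemma init2_inv : Inv2 initB ((5, 5), [(5, 5)]) := by
  refine ⟨rfl, rfl, rfl, rfl, ?_⟩
  intro e; simp [initB, PySem.Set.empty, edgesOf]

-- ===== VERDICT (by name: the statement is the Claim_ definition above) =====
theorem solution_spec : Claim_equal_solution := by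
  intro dirs _
  unfold Spec_solution solution solution_alt
  have h1 := (fold_inv dirs.toList initA initB init_inv).1
  have h2 := (fold2_inv dirs.toList initB ((5, 5), [(5, 5)]) init2_inv).2.2.2.1
  simp only
  rw [h1, h2]
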